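-- pv_equiv track=rewrite | github.com/tekcentu/MatrixGPT | structural_analysis/assembly.py | compute_half_bandwidth
-- ===== SOURCE A (Python) =====
-- def compute_half_bandwidth(gs: list[list[int]]) -> int:
--     """Return half-bandwidth from element DOF maps.
--
--     half_bandwidth = max(|i-j|)+1 over active equation pairs.
--     """
--
--     hb = 1
--     for g in gs:
--         active = [eq - 1 for eq in g if eq > 0]
--         for i in active:
--             for j in active:
--                 dist = abs(i - j) + 1
--                 if dist > hb:
--                     hb = dist
--     return hb
-- ===== SOURCE B (Python) =====
-- def compute_half_bandwidth(gs: list[list[int]]) -> int: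
--     """Return half-bandwidth from element DOF maps.
--
--     half_bandwidth = max(|i-j|)+1 over active equation pairs.
--     """
--     hb = 1
--     for g in gs:
--         active = [eq - 1 for eq in g if eq > 0]
--         if active:
--             hb = max(hb, max(active) - min(active) + 1)
--     return hb
-- ===== Notes on version B (the rewrite author's own statement) =====
-- stated objective: faster
-- what changed: Per element, replaces the all-pairs |i-j| double loop over active DOFs by a single max(active)-min(active)+1 computation, since the maximal pairwise distance is attained at the extremes.
import Mathlib
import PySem

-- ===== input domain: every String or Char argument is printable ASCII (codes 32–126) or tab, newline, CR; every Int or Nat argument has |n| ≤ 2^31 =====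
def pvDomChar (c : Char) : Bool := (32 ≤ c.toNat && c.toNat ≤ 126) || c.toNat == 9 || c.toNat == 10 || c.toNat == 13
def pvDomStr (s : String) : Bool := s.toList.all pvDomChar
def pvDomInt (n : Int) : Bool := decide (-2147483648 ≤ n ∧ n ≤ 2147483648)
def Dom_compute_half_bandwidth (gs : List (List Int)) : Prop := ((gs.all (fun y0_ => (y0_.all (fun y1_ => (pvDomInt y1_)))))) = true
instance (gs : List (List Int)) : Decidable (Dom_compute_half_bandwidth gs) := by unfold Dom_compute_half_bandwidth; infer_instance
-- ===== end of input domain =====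

-- B replaces A's all-pairs distance scan per element by max(active)-min(active)+1: O(n·k) instead of O(n·k²).


-- ===== PORT A =====
-- Literal port of A: nested all-pairs loop over the active (positive) equations of each element.
def compute_half_bandwidth (gs : List (List Int)) : Int :=
  gs.foldl (fun hb g =>
    let active := (g.filter (fun eq => eq > 0)).map (fun eq => eq - 1)
    active.foldl (fun hb i =>
      active.foldl (fun hb j =>
        let dist := |i - j| + 1
        if dist > hb then dist else hb) hb) hb) 1

-- ===== PORT B =====
-- B: per element take max(active) - min(active) + 1 (max/min via PySem.List.max?/min?, key = identity).
def compute_half_bandwidth_alt (gs : List (List Int)) : Int :=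
  gs.foldl (fun hb g =>
    let active := (g.filter (fun eq => eq > 0)).map (fun eq => eq - 1)
    match PySem.List.max? active (fun x => x), PySem.List.min? active (fun x => x) with
    | some mx, some mn => max hb (mx - mn + 1)
    | _, _ => hb) 1

-- ===== PRECONDITION & SPEC =====
def Spec_compute_half_bandwidth (gs : List (List Int)) (out : Int) : Prop := out = compute_half_bandwidth_alt gs
instance (gs : List (List Int)) (out : Int) : Decidable (Spec_compute_half_bandwidth gs out) := by unfold Spec_compute_half_bandwidth; infer_instance

-- ===== CLAIM (what is proved, stated in full; the proofs are below) =====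
def Claim_equal_compute_half_bandwidth : Prop := ∀ (gs : List (List Int)), Dom_compute_half_bandwidth gs → Spec_compute_half_bandwidth gs (compute_half_bandwidth gs)

-- ===== LEMMAS AND PROOFS =====

-- inner loop of A over j, for a fixed i
def pvInner (l : List Int) (i : Int) (h : Int) : Int :=
  l.foldl (fun hb j => let dist := |i - j| + 1; if dist > hb then dist else hb) h

-- outer loop of A over i (inner list fixed at l)
def pvOuter (rem l : List Int) (h : Int) : Int :=
  rem.foldl (fun hb i => pvInner l i hb) h

lemma pvInner_ge (l : List Int) (i h : Int) : h ≤ pvInner l i h := by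
  induction l generalizing h with
  | nil => simp [pvInner]
  | cons a t ih =>
    simp only [pvInner, List.foldl_cons] at *
    refine le_trans ?_ (ih _)
    split <;> omega

lemma pvInner_mem (l : List Int) (i h j : Int) (hj : j ∈ l) : |i - j| + 1 ≤ pvInner l i h := by
  induction l generalizing h with
  | nil => simp at hj
  | cons a t ih =>
    simp only [pvInner, List.foldl_cons] at *
    rcases List.mem_cons.mp hj with rfl | hj'
    · refine le_trans ?_ (pvInner_ge t i _)
      split <;> omega
    · exact ih _ hj'
lemma pvInner_le (l : List Int) (i h c : Int) (hh : h ≤ c)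
    (hb : ∀ j ∈ l, |i - j| + 1 ≤ c) : pvInner l i h ≤ c := by
  induction l generalizing h with
  | nil => simpa [pvInner] using hh
  | cons a t ih =>
    simp only [pvInner, List.foldl_cons] at *
    have h1 := hb a (List.mem_cons_self)
    refine ih _ ?_ (fun j hj => hb j (List.mem_cons_of_mem _ hj))
    split <;> omega

lemma pvOuter_ge (rem l : List Int) (h : Int) : h ≤ pvOuter rem l h := by
  induction rem generalizing h with
  | nil => simp [pvOuter]
  | cons a t ih =>
    simp only [pvOuter, List.foldl_cons] at *
    exact le_trans (pvInner_ge l a h) (ih _)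

lemma pvOuter_mem (rem l : List Int) (h i j : Int) (hi : i ∈ rem) (hj : j ∈ l) :
    |i - j| + 1 ≤ pvOuter rem l h := by
  induction rem generalizing h with
  | nil => simp at hi
  | cons a t ih =>
    simp only [pvOuter, List.foldl_cons] at *
    rcases List.mem_cons.mp hi with rfl | hi'
    · exact le_trans (pvInner_mem l i h j hj) (pvOuter_ge t l _)
    · exact ih _ hi'

lemma pvOuter_le (rem l : List Int) (h c : Int) (hh : h ≤ c)
    (hb : ∀ i ∈ rem, ∀ j ∈ l, |i - j| + 1 ≤ c) : pvOuter rem l h ≤ c := by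
  induction rem generalizing h with
  | nil => simpa [pvOuter] using hh
  | cons a t ih =>
    simp only [pvOuter, List.foldl_cons] at *
    exact ih _ (pvInner_le l a h c hh (hb a List.mem_cons_self))
      (fun i hi => hb i (List.mem_cons_of_mem _ hi))

-- per-element equality of the two step functions
lemma pvStep_eq (l : List Int) (h : Int) :
    pvOuter l l h =
      match PySem.List.max? l (fun x => x), PySem.List.min? l (fun x => x) with
      | some mx, some mn => max h (mx - mn + 1)
      | _, _ => h := by
  cases hl : l with
  | nil => simp [pvOuter, PySem.List.max?, PySem.List.min?]
  | cons a t =>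
    rw [← hl]
    have hne : l ≠ [] := by simp [hl]
    obtain ⟨mx, hmx⟩ : ∃ mx, PySem.List.max? l (fun x => x) = some mx := by
      cases hm : PySem.List.max? l (fun x => x) with
      | none => exact absurd ((PySem.List.max?_eq_none_iff _ _).mp hm) hne
      | some m => exact ⟨m, rfl⟩
    obtain ⟨mn, hmn⟩ : ∃ mn, PySem.List.min? l (fun x => x) = some mn := by
      cases hm : PySem.List.min? l (fun x => x) with
      | none => exact absurd ((PySem.List.min?_eq_none_iff _ _).mp hm) hne
      | some m => exact ⟨m, rfl⟩
    rw [hmx, hmn]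
    have hmxm := PySem.List.max?_mem hmx
    have hmnm := PySem.List.min?_mem hmn
    have hmax : ∀ y ∈ l, y ≤ mx := fun y hy => PySem.List.max?_isMax hmx y hy
    have hmin : ∀ y ∈ l, mn ≤ y := fun y hy => PySem.List.min?_isMin hmn y hy
    apply le_antisymm
    · refine pvOuter_le l l h _ (le_max_left _ _) (fun i hi j hj => ?_)
      have h1 := hmax i hi; have h2 := hmin i hi
      have h3 := hmax j hj; have h4 := hmin j hj
      have : |i - j| + 1 ≤ mx - mn + 1 := by
        rcases abs_cases (i - j) with ⟨he, _⟩ | ⟨he, _⟩ <;> omega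
      exact le_trans this (le_max_right _ _)
    · refine max_le (pvOuter_ge l l h) ?_
      have := pvOuter_mem l l h mx mn hmxm hmnm
      have habs : |mx - mn| = mx - mn := by
        have := hmin mx hmxm; rcases abs_cases (mx - mn) with ⟨he, _⟩ | ⟨he, _⟩ <;> omega
      omega

lemma pvFold_eq (gs : List (List Int)) (h : Int) :
    gs.foldl (fun hb g =>
      pvOuter ((g.filter (fun eq => eq > 0)).map (fun eq => eq - 1))
              ((g.filter (fun eq => eq > 0)).map (fun eq => eq - 1)) hb) h
    = gs.foldl (fun hb g =>
      let active := (g.filter (fun eq => eq > 0)).map (fun eq => eq - 1)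
      match PySem.List.max? active (fun x => x), PySem.List.min? active (fun x => x) with
      | some mx, some mn => max hb (mx - mn + 1)
      | _, _ => hb) h := by
  induction gs generalizing h with
  | nil => rfl
  | cons g t ih =>
    simp only [List.foldl_cons]
    rw [pvStep_eq]
    exact ih _

-- ===== VERDICT (by name: the statement is the Claim_ definition above) =====
theorem compute_half_bandwidth_spec : Claim_equal_compute_half_bandwidth := by
  intro gs _
  show compute_half_bandwidth gs = compute_half_bandwidth_alt gs
  exact pvFold_eq gs 1
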